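-- pv_equiv track=rewrite | github.com/Luksuz/truck-pallet-scheduler | sleper.py | assign_paired_containers
-- ===== SOURCE A (Python) =====
-- from typing import List, Tuple
--
-- def assign_paired_containers(paired_containers: List[Tuple[int, int]], container_lengths: List[int], num_columns: int) -> Tuple[List[Tuple[int, int]], List[int]]:
--     """
--     Assign paired containers to columns in an alternating fashion.
--     """
--     column_heights = [0] * num_columns
--     assignments = []
--
--     for pair in paired_containers:
--         for i, idx in enumerate(pair):
--             col = i % num_columns  # Alternate between columns for pairing
--             assignments.append((idx, col))
--             column_heights[col] += container_lengths[idx]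
--
--     return assignments, column_heights
-- ===== SOURCE B (Python) =====
-- def assign_paired_containers(paired_containers, container_lengths, num_columns):
--     # Phase 1: build the full assignments list.
--     assignments = []
--     for pair in paired_containers:
--         for i, idx in enumerate(pair):
--             assignments.append((idx, i % num_columns))
--     # Phase 2: group-by-column reduce into a dict of totals.
--     totals = {}
--     for idx, col in assignments:
--         totals[col] = totals.get(col, 0) + container_lengths[idx]
--     column_heights = [totals.get(c, 0) for c in range(num_columns)]
--     return assignments, column_heights
-- ===== Notes on version B (the rewrite author's own statement) =====
-- stated objective: alternative
-- what changed: A fuses appending an assignment and bumping a mutable column_heights slot in one nested loop; B first builds the whole assignments list, then reduces it group-by-column into a dict of totals and materializes column_heights from range(num_columns).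
-- outside the precondition, e.g. on assign_paired_containers([(0, 0)], [5], 0): A raises ZeroDivisionError, B raises ZeroDivisionError; on assign_paired_containers([(0, 0)], [5], -2): A raises IndexError, B returns ([(0, 0), (0, -1)], []); on assign_paired_containers([(0, 2)], [5], 2): A raises IndexError, B raises IndexError
import Mathlib
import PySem

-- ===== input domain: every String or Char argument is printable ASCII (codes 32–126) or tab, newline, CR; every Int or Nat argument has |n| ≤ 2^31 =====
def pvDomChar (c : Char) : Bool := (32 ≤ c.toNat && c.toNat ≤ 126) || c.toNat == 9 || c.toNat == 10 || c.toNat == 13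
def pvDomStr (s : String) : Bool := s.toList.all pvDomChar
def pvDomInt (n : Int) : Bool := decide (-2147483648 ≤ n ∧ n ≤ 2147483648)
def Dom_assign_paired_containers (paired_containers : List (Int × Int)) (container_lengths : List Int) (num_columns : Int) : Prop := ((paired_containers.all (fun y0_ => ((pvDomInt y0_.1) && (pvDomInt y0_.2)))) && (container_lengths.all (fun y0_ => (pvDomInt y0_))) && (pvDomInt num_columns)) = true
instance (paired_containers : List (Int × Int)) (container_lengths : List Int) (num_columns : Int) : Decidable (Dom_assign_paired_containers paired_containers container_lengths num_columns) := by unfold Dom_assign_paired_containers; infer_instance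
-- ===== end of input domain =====

-- B splits A's fused accumulation into a build phase (assignments) plus a group-by-column dict reduce; same return value (alternative decomposition, no speed claim).

-- ===== PORT A =====
def assign_paired_containers (paired_containers : List (Int × Int)) (container_lengths : List Int) (num_columns : Int) : (List (Int × Int)) × List Int :=
  let init : (List (Int × Int)) × List Int := ([], PySem.List.pyRepeat [(0 : Int)] num_columns)
  paired_containers.foldl (fun st pair =>
    (PySem.List.enumerate [pair.1, pair.2] 0).foldl (fun st p =>
      let col := PySem.Int.mod p.1 num_columns
      let assignments := st.1 ++ [(p.2, col)]
      let column_heights := PySem.List.pySetD st.2 col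
        (PySem.List.pyGetD st.2 col 0 + PySem.List.pyGetD container_lengths p.2 0)
      (assignments, column_heights)) st) init

-- ===== PORT B =====
def assign_paired_containers_alt (paired_containers : List (Int × Int)) (container_lengths : List Int) (num_columns : Int) : (List (Int × Int)) × List Int :=
  let assignments := paired_containers.foldl (fun acc pair =>
    (PySem.List.enumerate [pair.1, pair.2] 0).foldl (fun acc p =>
      acc ++ [(p.2, PySem.Int.mod p.1 num_columns)]) acc) []
  let totals := assignments.foldl (fun d p =>
      d.insert p.2 (d.getD p.2 0 + PySem.List.pyGetD container_lengths p.1 0))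
    (PySem.Dict.empty : PySem.Dict Int Int)
  let column_heights := (PySem.List.pyRange 0 num_columns 1).map (fun c => totals.getD c 0)
  (assignments, column_heights)

-- ===== PRECONDITION & SPEC =====
-- Pre_ excludes exactly the inputs where the Python A raises: num_columns ≤ 0 with a
-- non-empty pair list (ZeroDivisionError / IndexError on column_heights), and container
-- indices outside Python's wrap-around range of container_lengths (IndexError).
def Pre_assign_paired_containers (paired_containers : List (Int × Int)) (container_lengths : List Int) (num_columns : Int) : Prop :=
  paired_containers = [] ∨
    (1 ≤ num_columns ∧ ∀ p ∈ paired_containers,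
      PySem.Raise.InRange container_lengths.length p.1 ∧ PySem.Raise.InRange container_lengths.length p.2)
instance (paired_containers : List (Int × Int)) (container_lengths : List Int) (num_columns : Int) : Decidable (Pre_assign_paired_containers paired_containers container_lengths num_columns) := by unfold Pre_assign_paired_containers; infer_instance

def pvWitness_assign_paired_containers : (List (Int × Int)) × List Int × Int := ([(0, 1), (1, 0)], [3, 4], 2)

def Spec_assign_paired_containers (paired_containers : List (Int × Int)) (container_lengths : List Int) (num_columns : Int) (out : (List (Int × Int)) × List Int) : Prop := out = assign_paired_containers_alt paired_containers container_lengths num_columns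
instance (paired_containers : List (Int × Int)) (container_lengths : List Int) (num_columns : Int) (out : (List (Int × Int)) × List Int) : Decidable (Spec_assign_paired_containers paired_containers container_lengths num_columns out) := by unfold Spec_assign_paired_containers; infer_instance

-- ===== CLAIM (what is proved, stated in full; the proofs are below) =====
def Claim_equal_assign_paired_containers : Prop := ∀ (paired_containers : List (Int × Int)) (container_lengths : List Int) (num_columns : Int), Dom_assign_paired_containers paired_containers container_lengths num_columns → Pre_assign_paired_containers paired_containers container_lengths num_columns → Spec_assign_paired_containers paired_containers container_lengths num_columns (assign_paired_containers paired_containers container_lengths num_columns)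

-- ===== LEMMAS AND PROOFS =====

-- The list of (index, column) items each version appends, per pair.
def pvAsg (nc : Int) (pcs : List (Int × Int)) : List (Int × Int) :=
  pcs.flatMap (fun pr => [(pr.1, PySem.Int.mod 0 nc), (pr.2, PySem.Int.mod 1 nc)])

-- One height increment of A's fused loop.
def pvBump (cl : List Int) (h : List Int) (p : Int × Int) : List Int :=
  PySem.List.pySetD h p.2 (PySem.List.pyGetD h p.2 0 + PySem.List.pyGetD cl p.1 0)

-- Total length assigned to column c by the items of L.
def pvSum (cl : List Int) (c : Int) (L : List (Int × Int)) : Int :=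
  ((L.filter (fun p => p.2 == c)).map (fun p => PySem.List.pyGetD cl p.1 0)).sum

theorem pvAsg_cons (nc : Int) (pr : Int × Int) (pcs : List (Int × Int)) :
    pvAsg nc (pr :: pcs) = (pr.1, PySem.Int.mod 0 nc) :: (pr.2, PySem.Int.mod 1 nc) :: pvAsg nc pcs := rfl

theorem pvSum_cons (cl : List Int) (c : Int) (p : Int × Int) (L : List (Int × Int)) :
    pvSum cl c (p :: L) = (if p.2 = c then PySem.List.pyGetD cl p.1 0 else 0) + pvSum cl c L := by
  by_cases h : p.2 = c <;> simp [pvSum, h]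

theorem A_fold (cl : List Int) (nc : Int) (pcs : List (Int × Int)) :
    ∀ (asg : List (Int × Int)) (h : List Int),
      pcs.foldl (fun st pair =>
        (PySem.List.enumerate [pair.1, pair.2] 0).foldl (fun st p =>
          let col := PySem.Int.mod p.1 nc
          let assignments := st.1 ++ [(p.2, col)]
          let column_heights := PySem.List.pySetD st.2 col
            (PySem.List.pyGetD st.2 col 0 + PySem.List.pyGetD cl p.2 0)
          (assignments, column_heights)) st) (asg, h)
      = (asg ++ pvAsg nc pcs, (pvAsg nc pcs).foldl (pvBump cl) h) := by
  induction pcs with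
  | nil => intro asg h; simp [pvAsg]
  | cons pr pcs ih =>
    intro asg h
    rw [List.foldl_cons]
    calc _ = List.foldl _ (asg ++ [(pr.1, PySem.Int.mod 0 nc), (pr.2, PySem.Int.mod 1 nc)],
              pvBump cl (pvBump cl h (pr.1, PySem.Int.mod 0 nc)) (pr.2, PySem.Int.mod 1 nc)) pcs := by
            congr 1
            simp [PySem.List.enumerate_cons, PySem.List.enumerate_nil, pvBump]
      _ = _ := by
            rw [ih, pvAsg_cons]
            simp [List.foldl_cons, List.append_assoc]

theorem B_fold (nc : Int) (pcs : List (Int × Int)) :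
    ∀ (acc : List (Int × Int)),
      pcs.foldl (fun acc pair =>
        (PySem.List.enumerate [pair.1, pair.2] 0).foldl (fun acc p =>
          acc ++ [(p.2, PySem.Int.mod p.1 nc)]) acc) acc
      = acc ++ pvAsg nc pcs := by
  induction pcs with
  | nil => intro acc; simp [pvAsg]
  | cons pr pcs ih =>
    intro acc
    rw [List.foldl_cons]
    calc _ = List.foldl _ (acc ++ [(pr.1, PySem.Int.mod 0 nc), (pr.2, PySem.Int.mod 1 nc)]) pcs := by
            congr 1
            simp [PySem.List.enumerate_cons, PySem.List.enumerate_nil]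
      _ = _ := by
            rw [ih, pvAsg_cons]
            simp [List.append_assoc]

theorem bumps_length (cl : List Int) (L : List (Int × Int)) :
    ∀ (h : List Int), (L.foldl (pvBump cl) h).length = h.length := by
  induction L with
  | nil => intro h; rfl
  | cons p L ih => intro h; rw [List.foldl_cons, ih]; simp [pvBump, PySem.List.length_pySetD]

theorem getD_set_int (xs : List Int) (n m : Nat) (v : Int) (hn : n < xs.length) :
    (xs.set n v).getD m 0 = if m = n then v else xs.getD m 0 := by
  by_cases h : m = n
  · subst h; simp [List.getD_eq_getElem?_getD, hn]
  · simp [List.getD_eq_getElem?_getD, List.getElem?_set_ne (fun hh => h hh.symm), h]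

theorem bumps_getD (cl : List Int) (L : List (Int × Int)) :
    ∀ (h : List Int) (c : Int), 0 ≤ c → c < (h.length : Int) →
      (∀ p ∈ L, 0 ≤ p.2 ∧ p.2 < (h.length : Int)) →
      PySem.List.pyGetD (L.foldl (pvBump cl) h) c 0 = PySem.List.pyGetD h c 0 + pvSum cl c L := by
  induction L with
  | nil => intro h c _ _ _; simp [pvSum]
  | cons p L ih =>
    intro h c hc0 hclen hcols
    obtain ⟨hp0, hplen⟩ := hcols p (by simp)
    have hlen' : (pvBump cl h p).length = h.length := by simp [pvBump, PySem.List.length_pySetD]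
    rw [List.foldl_cons, ih (pvBump cl h p) c hc0 (by omega) (by
      intro q hq; have := hcols q (by simp [hq]); omega)]
    have e2 : p.2 = ((p.2.toNat : Nat) : Int) := (Int.toNat_of_nonneg hp0).symm
    have ec : c = ((c.toNat : Nat) : Int) := (Int.toNat_of_nonneg hc0).symm
    have hplt : p.2.toNat < h.length := by omega
    have : PySem.List.pyGetD (pvBump cl h p) c 0
        = (if c = p.2 then PySem.List.pyGetD h p.2 0 + PySem.List.pyGetD cl p.1 0
           else PySem.List.pyGetD h c 0) := by
      rw [pvBump, e2, ec]
      simp only [PySem.List.pyGetD_natCast, PySem.List.pySetD_natCast]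
      rw [getD_set_int _ _ _ _ hplt]
      by_cases hh : c.toNat = p.2.toNat
      · simp [hh]
      · simp [hh]
        intro he
        rw [max_eq_left hc0, max_eq_left hp0] at he
        omega
    rw [this, pvSum_cons]
    by_cases hh : p.2 = c
    · simp [hh]; ring
    · have : ¬ (c = p.2) := fun e => hh e.symm
      simp [hh, this]

theorem dict_getD (cl : List Int) (c : Int) (L : List (Int × Int)) :
    ∀ (d : PySem.Dict Int Int),
      (L.foldl (fun d p => d.insert p.2 (d.getD p.2 0 + PySem.List.pyGetD cl p.1 0)) d).getD c 0
      = d.getD c 0 + pvSum cl c L := by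
  induction L with
  | nil => intro d; simp [pvSum]
  | cons p L ih =>
    intro d
    rw [List.foldl_cons, ih, PySem.Dict.getD_insert, pvSum_cons]
    by_cases hh : c = p.2
    · simp [hh]; ring
    · have : ¬ (p.2 = c) := fun e => hh e.symm
      simp [hh, this]

theorem mod_col_bounds (nc a : Int) (h : 1 ≤ nc) :
    0 ≤ PySem.Int.mod a nc ∧ PySem.Int.mod a nc < nc := by
  rw [PySem.Int.mod_eq_emod_of_pos (by omega)]
  exact ⟨Int.emod_nonneg a (by omega), Int.emod_lt_of_pos a (by omega)⟩

-- ===== VERDICT (by name: the statement is the Claim_ definition above) =====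
theorem assign_paired_containers_spec : Claim_equal_assign_paired_containers := by
  intro pcs cl nc _ hpre
  unfold Spec_assign_paired_containers assign_paired_containers assign_paired_containers_alt
  rcases hpre with hnil | ⟨hnc, _⟩
  · subst hnil
    simp [PySem.List.pyRepeat_singleton, PySem.List.pyRange_one, Function.comp_def,
      List.map_const']
  · simp only [A_fold cl nc pcs, B_fold nc pcs, List.nil_append]
    refine Prod.ext rfl ?_
    have hrep : PySem.List.pyRepeat [(0 : Int)] nc = List.replicate nc.toNat 0 :=
      PySem.List.pyRepeat_singleton _ nc
    rw [hrep]
    have hlen : ((List.replicate nc.toNat (0:Int)).length : Int) = nc := by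
      rw [List.length_replicate]; omega
    apply List.ext_getElem
    · rw [bumps_length]
      simp [PySem.List.length_pyRange_one]
    · intro i h1 h2
      have hi : i < nc.toNat := by
        have := h2; simp [PySem.List.length_pyRange_one] at this; omega
      have hcols : ∀ p ∈ pvAsg nc pcs, 0 ≤ p.2 ∧ p.2 < ((List.replicate nc.toNat (0:Int)).length : Int) := by
        intro p hp
        rw [hlen]
        simp only [pvAsg, List.mem_flatMap] at hp
        obtain ⟨pr, _, hmem⟩ := hp
        simp only [List.mem_cons] at hmem
        rcases hmem with he | he | he
        · rw [he]; exact mod_col_bounds nc 0 hnc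
        · rw [he]; exact mod_col_bounds nc 1 hnc
        · cases he
      have hb := bumps_getD cl (pvAsg nc pcs) (List.replicate nc.toNat 0) (i : Int)
        (by positivity) (by rw [hlen]; omega) hcols
      have hl : ((pvAsg nc pcs).foldl (pvBump cl) (List.replicate nc.toNat 0))[i]
          = PySem.List.pyGetD ((pvAsg nc pcs).foldl (pvBump cl) (List.replicate nc.toNat 0)) (i : Int) 0 := by
        rw [PySem.List.pyGetD_natCast]
        rw [List.getD_eq_getElem?_getD, List.getElem?_eq_getElem h1]
        rfl
      rw [hl, hb]
      have hr : ((PySem.List.pyRange 0 nc 1).map (fun c =>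
          (((pvAsg nc pcs).foldl (fun d p => d.insert p.2 (d.getD p.2 0 + PySem.List.pyGetD cl p.1 0)) (PySem.Dict.empty : PySem.Dict Int Int)).getD c 0)))[i]
          = ((pvAsg nc pcs).foldl (fun d p => d.insert p.2 (d.getD p.2 0 + PySem.List.pyGetD cl p.1 0)) (PySem.Dict.empty : PySem.Dict Int Int)).getD ((0:Int) + i) 0 := by
        rw [List.getElem_map, PySem.List.getElem_pyRange_one]
      rw [hr, dict_getD]
      simp
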